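-- pv_equiv track=rewrite | github.com/abhishekpathak17052005/SpectraShield | backend/app/scanner.py | _host_matches_domain
-- ===== SOURCE A (Python) =====
-- def _host_matches_domain(hostname: str, trusted_domains: set[str]) -> bool:
--     host = (hostname or "").lower()
--     if not host:
--         return False
--     for domain in trusted_domains:
--         if host == domain or host.endswith(f".{domain}"):
--             return True
--     return False
-- ===== SOURCE B (Python) =====
-- def _host_matches_domain(hostname: str, trusted_domains: set[str]) -> bool:
--     host = (hostname or "").lower()
--     if not host:
--         return False
--     if host in trusted_domains:
--         return True
--     s = host
--     while True:
--         i = s.find('.')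
--         if i == -1:
--             return False
--         s = s[i + 1:]
--         if s in trusted_domains:
--             return True
-- ===== Notes on version B (the rewrite author's own statement) =====
-- stated objective: faster
-- what changed: Instead of scanning every trusted domain and testing host == d or host.endswith('.'+d), B walks the host's dot-suffixes (one C-speed find/slice per dot) and tests each for set membership, so the trusted-domain set is never iterated.
import Mathlib
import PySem

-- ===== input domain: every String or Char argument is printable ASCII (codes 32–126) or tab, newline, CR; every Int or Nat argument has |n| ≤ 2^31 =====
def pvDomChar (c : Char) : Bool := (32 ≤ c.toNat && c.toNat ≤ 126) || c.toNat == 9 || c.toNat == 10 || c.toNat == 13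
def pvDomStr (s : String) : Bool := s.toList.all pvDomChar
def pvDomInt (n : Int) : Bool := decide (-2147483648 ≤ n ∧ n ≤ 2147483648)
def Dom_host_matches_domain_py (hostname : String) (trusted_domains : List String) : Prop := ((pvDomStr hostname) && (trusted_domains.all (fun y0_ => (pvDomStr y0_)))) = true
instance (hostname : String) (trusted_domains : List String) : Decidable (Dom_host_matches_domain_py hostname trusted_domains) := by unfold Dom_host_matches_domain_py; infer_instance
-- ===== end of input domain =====

-- B replaces A's scan over all trusted domains by membership tests on the host's dot-suffixes (faster: independent of the number of trusted domains).
-- B replaces A's scan over all trusted domains by a suffix walk on the host (C-speed find/slice + set membership per dot); measurably faster, independent of the number of trusted domains.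
-- ===== PORT A =====
def host_matches_domain_py (hostname : String) (trusted_domains : List String) : Bool :=
  let host := PySem.Str.lower hostname
  if host = "" then false
  else trusted_domains.any (fun domain => host == domain || PySem.Str.endswith host ("." ++ domain))

-- ===== PORT B =====
-- Source B's while loop: i = s.find('.'); if -1 return False; s = s[i+1:]; if s in trusted return True; repeat.
-- (s.drop (i.toNat + 1) is exactly s[i+1:] here since find returns i with 0 ≤ i < s.length.)
def pvWalk (s : List Char) (trusted : List String) : Bool :=
  let i := PySem.Chars.find s ['.']
  if h : i = -1 then false
  else
    let s' := s.drop (i.toNat + 1)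
    if trusted.contains (String.ofList s') then true
    else pvWalk s' trusted
termination_by s.length
decreasing_by
  have hinf : ['.'] <:+: s := (PySem.Chars.find_ne_neg_one_iff s ['.']).mp h
  have hnn : 0 ≤ PySem.Chars.find s ['.'] := (PySem.Chars.find_nonneg_iff s ['.']).mpr hinf
  have hpre := (PySem.Chars.find_spec (s := s) (sub := ['.']) hnn).1
  have hlt : (PySem.Chars.find s ['.']).toNat < s.length := by
    rcases hpre with ⟨r, hr⟩
    by_contra hc
    rw [List.drop_eq_nil_of_le (by omega)] at hr
    simp at hr
  simp only [List.length_drop]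
  omega

def host_matches_domain_py_alt (hostname : String) (trusted_domains : List String) : Bool :=
  let host := PySem.Str.lower hostname
  if host = "" then false
  else if trusted_domains.contains host then true
  else pvWalk host.toList trusted_domains

-- ===== PRECONDITION & SPEC =====
def Spec_host_matches_domain_py (hostname : String) (trusted_domains : List String) (out : Bool) : Prop := out = host_matches_domain_py_alt hostname trusted_domains
instance (hostname : String) (trusted_domains : List String) (out : Bool) : Decidable (Spec_host_matches_domain_py hostname trusted_domains out) := by unfold Spec_host_matches_domain_py; infer_instance

-- ===== CLAIM (what is proved, stated in full; the proofs are below) =====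
def Claim_equal_host_matches_domain_py : Prop := ∀ (hostname : String) (trusted_domains : List String), Dom_host_matches_domain_py hostname trusted_domains → Spec_host_matches_domain_py hostname trusted_domains (host_matches_domain_py hostname trusted_domains)

-- ===== LEMMAS AND PROOFS =====

-- at the first dot index i, the dot-suffixes of s are s.drop (i+1) and the dot-suffixes of s.drop (i+1)
theorem dot_suffix_split (s t : List Char) (hne : PySem.Chars.find s ['.'] ≠ -1) :
    ('.' :: t <:+ s) ↔
      (t = s.drop ((PySem.Chars.find s ['.']).toNat + 1) ∨
        '.' :: t <:+ s.drop ((PySem.Chars.find s ['.']).toNat + 1)) := by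
  have hinf : ['.'] <:+: s := (PySem.Chars.find_ne_neg_one_iff s ['.']).mp hne
  have hnn : 0 ≤ PySem.Chars.find s ['.'] := (PySem.Chars.find_nonneg_iff s ['.']).mpr hinf
  obtain ⟨hpre, hmin⟩ := PySem.Chars.find_spec (s := s) (sub := ['.']) hnn
  set i := (PySem.Chars.find s ['.']).toNat with hi
  have hlt : i < s.length := by
    rcases hpre with ⟨r, hr⟩
    by_contra hc
    rw [List.drop_eq_nil_of_le (by omega)] at hr
    simp at hr
  have hdropi : s.drop i = '.' :: s.drop (i + 1) := by
    obtain ⟨r, hr⟩ := hpre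
    have h2 : s.drop i = s[i] :: s.drop (i + 1) := List.drop_eq_getElem_cons hlt
    rw [h2] at hr ⊢
    have hr' : '.' :: r = s[i] :: s.drop (i + 1) := by simpa using hr
    rw [← (List.cons_eq_cons.mp hr').1]
  constructor
  · rintro ⟨p, hp⟩
    have hdj : s.drop p.length = '.' :: t := by
      rw [← hp, List.drop_left]
    have hge : i ≤ p.length := by
      by_contra hc
      exact hmin p.length (by omega) ⟨t, by simp [hdj]⟩
    rcases Nat.eq_or_lt_of_le hge with heq | hgt
    · left
      rw [← heq, hdropi] at hdj
      exact ((List.cons_eq_cons.mp hdj).2).symm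
    · right
      have hdd : s.drop p.length = (s.drop (i + 1)).drop (p.length - (i + 1)) := by
        rw [List.drop_drop]
        congr 1
        omega
      rw [hdj] at hdd
      exact hdd ▸ List.drop_suffix _ _
  · rintro (rfl | h)
    · exact hdropi ▸ List.drop_suffix i s
    · exact h.trans (List.drop_suffix (i + 1) s)

theorem pvWalk_iff (trusted : List String) (s : List Char) :
    pvWalk s trusted = true ↔
      ∃ t, '.' :: t <:+ s ∧ trusted.contains (String.ofList t) = true := by
  fun_induction pvWalk s trusted with
  | case1 s i h =>
    refine iff_of_false (by simp) ?_
    rintro ⟨t, ⟨p, hp⟩, -⟩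
    exact (PySem.Chars.find_eq_neg_one_iff s ['.']).mp h ⟨p, t, by simpa using hp⟩
  | case2 s i h s2 hc =>
    exact iff_of_true rfl
      ⟨s.drop ((PySem.Chars.find s ['.']).toNat + 1),
        (dot_suffix_split s _ h).mpr (Or.inl rfl), hc⟩
  | case3 s i h s2 hc ih =>
    rw [ih]
    constructor
    · rintro ⟨t, hsuf, hT⟩
      exact ⟨t, (dot_suffix_split s t h).mpr (Or.inr hsuf), hT⟩
    · rintro ⟨t, hsuf, hT⟩
      rcases (dot_suffix_split s t h).mp hsuf with rfl | hs2
      · exact absurd hT hc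
      · exact ⟨t, hs2, hT⟩

-- ===== VERDICT (by name: the statement is the Claim_ definition above) =====
theorem host_matches_domain_py_spec : Claim_equal_host_matches_domain_py := by
  intro hostname trusted_domains _
  unfold Spec_host_matches_domain_py host_matches_domain_py host_matches_domain_py_alt
  simp only []
  by_cases h : PySem.Str.lower hostname = ""
  · simp [h]
  · simp only [if_neg h]
    set host := PySem.Str.lower hostname with hh
    rw [Bool.eq_iff_iff]
    simp only [List.any_eq_true, Bool.or_eq_true, beq_iff_eq, PySem.Str.endswith_eq,
      PySem.Chars.endswith_iff, List.contains_eq_mem, decide_eq_true_eq,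
      Bool.if_true_left, Bool.or_eq_true, pvWalk_iff]
    constructor
    · rintro ⟨d, hd, hmatch | hsuf⟩
      · exact Or.inl (hmatch ▸ hd)
      · refine Or.inr ⟨d.toList, ?_, ?_⟩
        · simpa [String.toList_append] using hsuf
        · simpa [List.contains_eq_mem] using hd
    · rintro (hmem | ⟨t, hsuf, hT⟩)
      · exact ⟨host, hmem, Or.inl rfl⟩
      · refine ⟨String.ofList t, by simpa [List.contains_eq_mem] using hT, Or.inr ?_⟩
        simpa [String.toList_append] using hsuf
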